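-- pv_equiv track=rewrite | github.com/bakikucukcakiroglu/CMPE300-1 | HasanBakiKucukcakirogluMiracBatuhanMalazgirt.py | ex_function
-- ===== SOURCE A (Python) =====
-- def ex_function(vctr ):
--
--
--     y=0
--     i=0
--     n= len(vctr)
--
--     for X in vctr:
--
--         if(X==0):
--
--             for j in range(i, n):
--
--                 k=n
--
--                 while(k>=1):
--
--                     y=y+1
--                     k=k//2
--
--         else:
--
--             for m in range(i, n):
--
--                 for t in range(1, n+1):
--                     x=n
--                     while(x>0):
--
--                         x=x-t
--                         y=y+1
--         i=i+1
--
--     return y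
-- ===== SOURCE B (Python) =====
-- def ex_function(vctr):
--     n = len(vctr)
--     halv = n.bit_length()
--     ceil_sum = sum(-(-n // t) for t in range(1, n + 1))
--     return sum((n - i) * (halv if x == 0 else ceil_sum) for i, x in enumerate(vctr))
-- ===== Notes on version B (the rewrite author's own statement) =====
-- stated objective: faster
-- what changed: Replaces A's three-deep nested counting loops with a closed form: compute the halving count n.bit_length() and the per-t ceiling-division sum once in O(n), then weight each by (n-i) per element.
import Mathlib
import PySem

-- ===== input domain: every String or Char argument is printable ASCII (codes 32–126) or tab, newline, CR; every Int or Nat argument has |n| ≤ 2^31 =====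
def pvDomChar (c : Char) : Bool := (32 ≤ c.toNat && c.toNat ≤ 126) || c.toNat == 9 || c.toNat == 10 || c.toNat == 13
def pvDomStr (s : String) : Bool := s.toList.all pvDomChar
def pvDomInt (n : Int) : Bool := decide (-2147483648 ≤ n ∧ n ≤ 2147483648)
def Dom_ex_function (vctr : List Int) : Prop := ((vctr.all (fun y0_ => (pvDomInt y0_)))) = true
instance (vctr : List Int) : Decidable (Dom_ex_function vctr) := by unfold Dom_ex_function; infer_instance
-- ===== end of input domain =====

-- B replaces A's three-deep nested counting loops by an O(n) closed form:
-- a per-t ceiling-division sum and a bit-length term, weighted by (n - i).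

-- ===== PORT A =====
-- while(k>=1): y=y+1; k=k//2
def pvWhileHalf (k : Int) (y : Int) : Int :=
  if h : 1 ≤ k then pvWhileHalf (PySem.Int.floordiv k 2) (y + 1) else y
termination_by k.toNat
decreasing_by
  have h2 : PySem.Int.floordiv k 2 = k / 2 := PySem.Int.floordiv_eq_ediv_of_pos (by omega)
  rw [h2]; omega

-- while(x>0): x=x-t; y=y+1  — fuel-guarded (fuel n.toNat suffices since t ≥ 1 in A)
def pvWhileSub : Nat → Int → Int → Int → Int
  | 0, _, _, y => y
  | fuel + 1, t, x, y => if 0 < x then pvWhileSub fuel t (x - t) (y + 1) else y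

def ex_function (vctr : List Int) : Int :=
  let n : Int := PySem.List.len vctr
  (vctr.foldl (fun (acc : Int × Int) X =>
      let y := acc.1
      let i := acc.2
      let y :=
        if X == 0 then
          (PySem.List.pyRange i n 1).foldl (fun y _j => pvWhileHalf n y) y
        else
          (PySem.List.pyRange i n 1).foldl (fun y _m =>
            (PySem.List.pyRange 1 (n + 1) 1).foldl (fun y t => pvWhileSub n.toNat t n y) y) y
      (y, i + 1)) (0, 0)).1

-- ===== PORT B =====
def ex_function_alt (vctr : List Int) : Int :=
  let n : Int := PySem.List.len vctr
  let halv : Int := (PySem.Int.bitLength n : Int)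
  let ceil_sum : Int := ((PySem.List.pyRange 1 (n + 1) 1).map
      (fun t => -(PySem.Int.floordiv (-n) t))).sum
  ((PySem.List.enumerate vctr 0).map
      (fun p => (n - p.1) * (if p.2 == 0 then halv else ceil_sum))).sum

-- ===== PRECONDITION & SPEC =====
def Spec_ex_function (vctr : List Int) (out : Int) : Prop := out = ex_function_alt vctr
instance (vctr : List Int) (out : Int) : Decidable (Spec_ex_function vctr out) := by unfold Spec_ex_function; infer_instance

-- ===== CLAIM (what is proved, stated in full; the proofs are below) =====
def Claim_equal_ex_function : Prop := ∀ (vctr : List Int), Dom_ex_function vctr → Spec_ex_function vctr (ex_function vctr)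

-- ===== LEMMAS AND PROOFS =====

-- the halving while-loop counts bitLength n steps
theorem pvWhileHalf_eq_aux : ∀ (m : Nat) (k y : Int), 0 ≤ k → k.toNat ≤ m →
    pvWhileHalf k y = y + (PySem.Int.bitLength k : Int) := by
  intro m
  induction m with
  | zero =>
    intro k y hk hm
    have hk0 : k = 0 := by omega
    subst hk0
    rw [pvWhileHalf]
    simp [PySem.Int.bitLength_zero]
  | succ m ih =>
    intro k y hk hm
    rw [pvWhileHalf]
    split_ifs with h1
    · have heq : PySem.Int.floordiv k 2 = k / 2 := PySem.Int.floordiv_eq_ediv_of_pos (by omega)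
      have hrec := PySem.Int.bitLength_of_pos (n := k) (by omega)
      rw [heq] at hrec ⊢
      rw [ih (k / 2) (y + 1) (by omega) (by omega), hrec]
      push_cast; ring
    · have hk0 : k = 0 := by omega
      subst hk0
      simp [PySem.Int.bitLength_zero]

theorem pvWhileHalf_eq (k : Int) (y : Int) (hk : 0 ≤ k) :
    pvWhileHalf k y = y + (PySem.Int.bitLength k : Int) :=
  pvWhileHalf_eq_aux k.toNat k y hk (le_refl _)

theorem pvWhileSub_nonpos (fuel : Nat) (t x y : Int) (hx : ¬ 0 < x) :
    pvWhileSub fuel t x y = y := by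
  cases fuel <;> simp [pvWhileSub, hx]

-- ceiling-division recurrence and base case, via floor division by a positive divisor
theorem pv_ceil_step (t x : Int) (ht : 1 ≤ t) :
    -(PySem.Int.floordiv (-x) t) = 1 + -(PySem.Int.floordiv (-(x - t)) t) := by
  rw [PySem.Int.floordiv_eq_ediv_of_pos (by omega), PySem.Int.floordiv_eq_ediv_of_pos (by omega)]
  have h1 : -(x - t) = -x + 1 * t := by ring
  rw [h1, Int.add_mul_ediv_right _ _ (by omega : t ≠ 0)]
  ring

theorem pv_ceil_one (t x : Int) (ht : 1 ≤ t) (h1 : 0 < x) (h2 : x ≤ t) :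
    -(PySem.Int.floordiv (-x) t) = 1 := by
  rw [PySem.Int.floordiv_eq_ediv_of_pos (by omega)]
  have h3 : -x = (t - x) + (-1) * t := by ring
  rw [h3, Int.add_mul_ediv_right _ _ (by omega : t ≠ 0),
    Int.ediv_eq_zero_of_lt (by omega) (by omega)]
  ring

theorem pv_ceil_zero (t : Int) (ht : 1 ≤ t) : -(PySem.Int.floordiv (-(0 : Int)) t) = 0 := by
  rw [PySem.Int.floordiv_eq_ediv_of_pos (by omega)]
  simp

-- the subtracting while-loop counts ceil(x/t) steps (t ≥ 1, 0 ≤ x ≤ fuel)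
theorem pvWhileSub_eq (fuel : Nat) (t x y : Int) (ht : 1 ≤ t) (hx : 0 ≤ x)
    (hfuel : x ≤ fuel) :
    pvWhileSub fuel t x y = y + -(PySem.Int.floordiv (-x) t) := by
  induction fuel generalizing x y with
  | zero =>
    have hx0 : x = 0 := by omega
    subst hx0
    rw [pv_ceil_zero t ht]
    simp [pvWhileSub]
  | succ m ih =>
    simp only [pvWhileSub]
    split_ifs with h1
    · by_cases h2 : 0 < x - t
      · rw [ih (x - t) (y + 1) (by omega) (by omega), pv_ceil_step t x ht]
        ring
      · rw [pvWhileSub_nonpos m t (x - t) (y + 1) h2, pv_ceil_one t x ht h1 (by omega)]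
    · have hx0 : x = 0 := by omega
      subst hx0
      rw [pv_ceil_zero t ht]
      ring

-- a fold that adds a constant per element
theorem pv_foldl_step {α : Type} (l : List α) (g : Int → Int) (c : Int)
    (h : ∀ y, g y = y + c) : ∀ y, l.foldl (fun y _ => g y) y = y + l.length * c := by
  induction l with
  | nil => intro y; simp
  | cons a l ih =>
    intro y
    simp only [List.foldl_cons]
    rw [ih (g y), h y]
    simp only [List.length_cons]; push_cast; ring

-- a fold that adds c t per element t
theorem pv_foldl_add_of_mem (l : List Int) (f : Int → Int → Int) (c : Int → Int)
    (h : ∀ t ∈ l, ∀ y, f y t = y + c t) : ∀ y, l.foldl f y = y + (l.map c).sum := by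
  induction l with
  | nil => intro y; simp
  | cons a l ih =>
    intro y
    simp only [List.foldl_cons, List.map_cons, List.sum_cons,
      h a (List.mem_cons_self), ih (fun t ht y => h t (List.mem_cons_of_mem a ht) y)]
    ring

-- per-t ceiling sum (B's ceil_sum), used by the proofs
def pvS (n : Int) : Int :=
  ((PySem.List.pyRange 1 (n + 1) 1).map (fun t => -(PySem.Int.floordiv (-n) t))).sum

theorem pv_zero_branch (n i y : Int) (hn : 0 ≤ n) :
    (PySem.List.pyRange i n 1).foldl (fun y _j => pvWhileHalf n y) y
      = y + ((n - i).toNat : Int) * (PySem.Int.bitLength n : Int) := by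
  rw [pv_foldl_step _ (pvWhileHalf n) _ (fun y => pvWhileHalf_eq n y hn) y,
    PySem.List.length_pyRange_one]

theorem pv_inner (n y : Int) (hn : 0 ≤ n) :
    (PySem.List.pyRange 1 (n + 1) 1).foldl (fun y t => pvWhileSub n.toNat t n y) y
      = y + pvS n := by
  exact pv_foldl_add_of_mem _ _ (fun t => -(PySem.Int.floordiv (-n) t))
    (fun t htmem y => by
      have hb := PySem.List.mem_pyRange_one.mp htmem
      exact pvWhileSub_eq n.toNat t n y (by omega) hn (by omega)) y

theorem pv_else_branch (n i y : Int) (hn : 0 ≤ n) :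
    (PySem.List.pyRange i n 1).foldl (fun y _m =>
        (PySem.List.pyRange 1 (n + 1) 1).foldl (fun y t => pvWhileSub n.toNat t n y) y) y
      = y + ((n - i).toNat : Int) * pvS n := by
  rw [pv_foldl_step _ _ (pvS n) (fun y => pv_inner n y hn) y,
    PySem.List.length_pyRange_one]

theorem pv_loopA (n : Int) (hn : 0 ≤ n) (l : List Int) :
    ∀ (i y : Int),
    (l.foldl (fun (acc : Int × Int) X =>
        let y := acc.1
        let i := acc.2
        let y :=
          if X == 0 then
            (PySem.List.pyRange i n 1).foldl (fun y _j => pvWhileHalf n y) y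
          else
            (PySem.List.pyRange i n 1).foldl (fun y _m =>
              (PySem.List.pyRange 1 (n + 1) 1).foldl (fun y t => pvWhileSub n.toNat t n y) y) y
        (y, i + 1)) (y, i)).1
      = y + ((PySem.List.enumerate l i).map
          (fun p => ((n - p.1).toNat : Int)
            * (if p.2 == 0 then (PySem.Int.bitLength n : Int) else pvS n))).sum := by
  induction l with
  | nil => intro i y; simp [PySem.List.enumerate_nil]
  | cons a l ih =>
    intro i y
    have hstep :
        (if a == 0 then
            (PySem.List.pyRange i n 1).foldl (fun y _j => pvWhileHalf n y) y
          else
            (PySem.List.pyRange i n 1).foldl (fun y _m =>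
              (PySem.List.pyRange 1 (n + 1) 1).foldl (fun y t => pvWhileSub n.toNat t n y) y) y)
        = y + ((n - i).toNat : Int)
            * (if a == 0 then (PySem.Int.bitLength n : Int) else pvS n) := by
      split_ifs with h
      · exact pv_zero_branch n i y hn
      · exact pv_else_branch n i y hn
    simp only [List.foldl_cons]
    rw [ih (i + 1) _, hstep, PySem.List.enumerate_cons, List.map_cons, List.sum_cons]
    ring

-- ===== VERDICT (by name: the statement is the Claim_ definition above) =====
theorem ex_function_spec : Claim_equal_ex_function := by
  unfold Claim_equal_ex_function Spec_ex_function
  intro vctr _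
  unfold ex_function ex_function_alt
  simp only [PySem.List.len_eq]
  rw [pv_loopA (vctr.length : Int) (by positivity) vctr 0 0, zero_add]
  congr 1
  apply List.map_congr_left
  intro p hp
  obtain ⟨k, hk, rfl⟩ := (PySem.List.mem_enumerate_iff vctr 0 p).mp hp
  have hcast : (((vctr.length : Int) - ((0 : Int) + k)).toNat : Int)
      = (vctr.length : Int) - ((0 : Int) + k) := by omega
  rw [hcast]
  rfl
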